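-- pv_equiv track=rewrite | github.com/harsh-sagar03/Sentinel-JIT | app.py | extract_narrative
-- ===== SOURCE A (Python) =====
-- from typing import Any, Dict, List, Tuple
--
-- def extract_narrative(
--     report: str,
-- ) -> Tuple[List[str], List[str]]:
--     """Return (body_paragraphs, conclusion_sentences)."""
--     paragraphs: List[str] = []
--     conclusion: List[str] = []
--     in_concl = False
--     skip_keys = {
--         "ATTACK BEHAVIOR", "Threat Intelligence",
--         "Total commands", "Attack stages detected",
--         "NARRATIVE SUMMARY", "Sentinel-JIT", "CONCLUSION",
--         "Recommended Action:",
--     }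
--     for line in report.split("\n"):
--         s = line.strip()
--         if not s or s.startswith("=") or s.startswith("-"):
--             continue
--         if any(k in s for k in skip_keys):
--             if "CONCLUSION" in s:
--                 in_concl = True
--             continue
--         if in_concl:
--             conclusion.append(s)
--         elif len(s) > 20:
--             paragraphs.append(s)
--     return paragraphs, conclusion
-- ===== SOURCE B (Python) =====
-- from typing import List, Tuple
--
-- SKIP_KEYS = (
--     "ATTACK BEHAVIOR", "Threat Intelligence",
--     "Total commands", "Attack stages detected",
--     "NARRATIVE SUMMARY", "Sentinel-JIT", "CONCLUSION",
--     "Recommended Action:",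
-- )
--
--
-- def _visible(s: str) -> bool:
--     return bool(s) and not s.startswith("=") and not s.startswith("-")
--
--
-- def _keep(s: str) -> bool:
--     return _visible(s) and not any(k in s for k in SKIP_KEYS)
--
--
-- def extract_narrative(
--     report: str,
-- ) -> Tuple[List[str], List[str]]:
--     """Return (body_paragraphs, conclusion_sentences)."""
--     lines = [line.strip() for line in report.split("\n")]
--     # boundary: first surviving line that mentions CONCLUSION; all of it is body if absent
--     b = next((i for i, s in enumerate(lines)
--               if _visible(s) and "CONCLUSION" in s), len(lines))
--     body = [s for s in lines[:b] if _keep(s) and len(s) > 20]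
--     concl = [s for s in lines[b + 1:] if _keep(s)]
--     return body, concl
-- ===== Notes on version B (the rewrite author's own statement) =====
-- stated objective: alternative
-- what changed: Replaced the single stateful pass with a mode flag by a boundary search (index of the first surviving line mentioning CONCLUSION) followed by two independent filter passes over the slices before and after it.
import Mathlib
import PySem

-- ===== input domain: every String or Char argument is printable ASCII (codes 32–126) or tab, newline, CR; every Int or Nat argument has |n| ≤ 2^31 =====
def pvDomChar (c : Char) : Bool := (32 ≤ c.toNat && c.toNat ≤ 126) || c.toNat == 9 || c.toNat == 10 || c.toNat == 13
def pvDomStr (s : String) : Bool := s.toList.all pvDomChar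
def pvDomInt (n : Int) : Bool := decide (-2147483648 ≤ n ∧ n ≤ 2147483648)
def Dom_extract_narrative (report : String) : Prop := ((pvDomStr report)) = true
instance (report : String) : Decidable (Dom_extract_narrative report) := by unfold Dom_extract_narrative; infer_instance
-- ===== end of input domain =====

-- B replaces A's stateful mode-flag pass by a boundary search plus two independent filter passes (objective: alternative decomposition).

-- report.split("\n"): sep ≠ "" so split? is always some; shared by both ports
def pvLines (report : String) : List String :=
  (PySem.Str.split? report "\n").getD []

-- the skip_keys set of A (= SKIP_KEYS tuple of Source B)
def pvSkipKeys : List String :=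
  ["ATTACK BEHAVIOR", "Threat Intelligence",
   "Total commands", "Attack stages detected",
   "NARRATIVE SUMMARY", "Sentinel-JIT", "CONCLUSION",
   "Recommended Action:"]

-- ===== PORT A =====
-- A's loop body on the stripped line s (the loop strips first, then runs this)
def pvStepS (st : List String × List String × Bool) (s : String) :
    List String × List String × Bool :=
  if s == "" || PySem.Str.startswith s "=" || PySem.Str.startswith s "-" then st
  else if pvSkipKeys.any (fun k => PySem.Str.isIn k s) then
    (if PySem.Str.isIn "CONCLUSION" s then (st.1, st.2.1, true) else st)
  else if st.2.2 then (st.1, st.2.1 ++ [s], st.2.2)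
  else if PySem.Str.len s > 20 then (st.1 ++ [s], st.2.1, st.2.2)
  else st

def extract_narrative (report : String) : List String × List String :=
  let r := (pvLines report).foldl
    (fun st line => pvStepS st (PySem.Str.strip line)) ([], [], false)
  (r.1, r.2.1)

-- ===== PORT B =====
def pvVisible (s : String) : Bool :=
  !(s == "") && !(PySem.Str.startswith s "=") && !(PySem.Str.startswith s "-")

def pvKeep (s : String) : Bool :=
  pvVisible s && !(pvSkipKeys.any (fun k => PySem.Str.isIn k s))

def extract_narrative_alt (report : String) : List String × List String :=
  let lines := (pvLines report).map PySem.Str.strip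
  let b := (lines.findIdx? (fun s => pvVisible s && PySem.Str.isIn "CONCLUSION" s)).getD lines.length
  ((lines.take b).filter (fun s => pvKeep s && PySem.Str.len s > 20),
   (lines.drop (b + 1)).filter pvKeep)

-- ===== PRECONDITION & SPEC =====
def Spec_extract_narrative (report : String) (out : List String × List String) : Prop := out = extract_narrative_alt report
instance (report : String) (out : List String × List String) : Decidable (Spec_extract_narrative report out) := by unfold Spec_extract_narrative; infer_instance

-- ===== CLAIM (what is proved, stated in full; the proofs are below) =====
def Claim_equal_extract_narrative : Prop := ∀ (report : String), Dom_extract_narrative report → Spec_extract_narrative report (extract_narrative report)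

-- ===== LEMMAS AND PROOFS =====

-- abbreviations used only by the proofs
def pvIsB (s : String) : Bool := pvVisible s && PySem.Str.isIn "CONCLUSION" s
def pvBodyP (s : String) : Bool := pvKeep s && PySem.Str.len s > 20

lemma pvToListEqSign : ("=" : String).toList = ['='] := rfl
lemma pvToListDash : ("-" : String).toList = ['-'] := rfl
lemma pvToListConcl :
    ("CONCLUSION" : String).toList = ['C', 'O', 'N', 'C', 'L', 'U', 'S', 'I', 'O', 'N'] := rfl

lemma pvStepS_skip (st : List String × List String × Bool) (s : String)
    (h1 : (s == "" || PySem.Str.startswith s "=" || PySem.Str.startswith s "-") = true) :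
    pvStepS st s = st := by
  unfold pvStepS; rw [if_pos h1]

lemma pvVisible_false_of_sep (s : String)
    (h1 : (s == "" || PySem.Str.startswith s "=" || PySem.Str.startswith s "-") = true) :
    pvVisible s = false := by
  simp only [Bool.or_eq_true, beq_iff_eq, PySem.Str.startswith_eq, pvToListEqSign,
    pvToListDash] at h1
  simp only [pvVisible]
  rcases h1 with (h | h) | h <;> simp [h]

lemma pvVisible_true_of_not_sep (s : String)
    (h1 : ¬ (s == "" || PySem.Str.startswith s "=" || PySem.Str.startswith s "-") = true) :
    pvVisible s = true := by
  simp only [Bool.or_eq_true, beq_iff_eq, PySem.Str.startswith_eq, pvToListEqSign,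
    pvToListDash, not_or, Bool.not_eq_true] at h1
  simp only [pvVisible, Bool.and_eq_true, Bool.not_eq_true']
  exact ⟨⟨by simp [h1.1.1], h1.1.2⟩, h1.2⟩

lemma pvStepS_true (ts : List String) (p c : List String) :
    ts.foldl pvStepS (p, c, true) = (p, c ++ ts.filter pvKeep, true) := by
  induction ts generalizing c with
  | nil => simp
  | cons s ts ih =>
    simp only [List.foldl_cons, List.filter_cons]
    by_cases h1 : (s == "" || PySem.Str.startswith s "=" || PySem.Str.startswith s "-") = true
    · have hk : pvKeep s = false := by simp [pvKeep, pvVisible_false_of_sep s h1]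
      rw [pvStepS_skip _ _ h1, hk, ih]
      simp
    · have hv := pvVisible_true_of_not_sep s h1
      by_cases h2 : (pvSkipKeys.any fun k => PySem.Str.isIn k s) = true
      · have hst : pvStepS (p, c, true) s = (p, c, true) := by
          unfold pvStepS; rw [if_neg h1, if_pos h2]
          split <;> rfl
        simp only [List.any_eq_true, PySem.Str.isIn_eq] at h2
        obtain ⟨x, hx, hxin⟩ := h2
        have hk : pvKeep s = false := by
          simp [pvKeep]
          intro _
          exact ⟨x, hx, hxin⟩
        rw [hst, hk, ih]; simp
      · have hst : pvStepS (p, c, true) s = (p, c ++ [s], true) := by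
          unfold pvStepS; rw [if_neg h1, if_neg h2]
          simp
        simp only [List.any_eq_true, PySem.Str.isIn_eq, not_exists, not_and,
          Bool.not_eq_true] at h2
        have hk : pvKeep s = true := by simp [pvKeep, hv]; exact h2
        rw [hst, hk, ih]; simp

lemma pvStepS_false (ts : List String) (p c : List String) :
    ts.foldl pvStepS (p, c, false) =
      match ts.findIdx? pvIsB with
      | none => (p ++ ts.filter pvBodyP, c, false)
      | some b => (p ++ (ts.take b).filter pvBodyP,
                   c ++ (ts.drop (b + 1)).filter pvKeep, true) := by
  induction ts generalizing p with
  | nil => simp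
  | cons s ts ih =>
    simp only [List.foldl_cons, List.findIdx?_cons]
    by_cases h1 : (s == "" || PySem.Str.startswith s "=" || PySem.Str.startswith s "-") = true
    · have hv := pvVisible_false_of_sep s h1
      have hb : pvIsB s = false := by simp [pvIsB, hv]
      have hk : pvBodyP s = false := by simp [pvBodyP, pvKeep, hv]
      rw [pvStepS_skip _ _ h1, ih, hb]
      cases ts.findIdx? pvIsB <;> simp [hk]
    · have hv := pvVisible_true_of_not_sep s h1
      by_cases h2 : (pvSkipKeys.any fun k => PySem.Str.isIn k s) = true
      · by_cases h3 : PySem.Str.isIn "CONCLUSION" s = true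
        · have hst : pvStepS (p, c, false) s = (p, c, true) := by
            unfold pvStepS; rw [if_neg h1, if_pos h2, if_pos h3]
          have hb : pvIsB s = true := by
            simp only [PySem.Str.isIn_eq, pvToListConcl] at h3
            simp [pvIsB, hv, h3]
          rw [hst, pvStepS_true, hb]
          simp
        · have hst : pvStepS (p, c, false) s = (p, c, false) := by
            unfold pvStepS; rw [if_neg h1, if_pos h2, if_neg h3]
          have h3' : PySem.Chars.isIn
              ['C', 'O', 'N', 'C', 'L', 'U', 'S', 'I', 'O', 'N'] s.toList = false := by
            have := Bool.not_eq_true _ |>.mp h3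
            simpa only [PySem.Str.isIn_eq, pvToListConcl] using this
          have hb : pvIsB s = false := by simp [pvIsB, h3']
          simp only [List.any_eq_true, PySem.Str.isIn_eq] at h2
          obtain ⟨x, hx, hxin⟩ := h2
          have hk : pvBodyP s = false := by
            simp [pvBodyP, pvKeep]
            intro _ hall
            rw [hall x hx] at hxin; exact absurd hxin (by decide)
          rw [hst, ih, hb]
          cases ts.findIdx? pvIsB <;> simp [hk]
      · have h2' := h2
        simp only [List.any_eq_true, PySem.Str.isIn_eq, not_exists, not_and,
          Bool.not_eq_true] at h2'
        have h3 : ¬ PySem.Str.isIn "CONCLUSION" s = true := by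
          simp only [PySem.Str.isIn_eq, Bool.not_eq_true]
          exact h2' "CONCLUSION" (by simp [pvSkipKeys])
        have h3' : PySem.Chars.isIn
            ['C', 'O', 'N', 'C', 'L', 'U', 'S', 'I', 'O', 'N'] s.toList = false := by
          have := Bool.not_eq_true _ |>.mp h3
          simpa only [PySem.Str.isIn_eq, pvToListConcl] using this
        have hb : pvIsB s = false := by simp [pvIsB, h3']
        have hk : pvKeep s = true := by simp [pvKeep, hv]; exact h2'
        by_cases h4 : PySem.Str.len s > 20
        · have hst : pvStepS (p, c, false) s = (p ++ [s], c, false) := by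
            unfold pvStepS; rw [if_neg h1, if_neg h2]
            simp only [if_pos h4]
            simp
          have hbp : pvBodyP s = true := by
            simp only [pvBodyP, hk, Bool.true_and, decide_eq_true_eq]
            exact h4
          rw [hst, ih, hb]
          cases ts.findIdx? pvIsB <;> simp [hbp]
        · have hst : pvStepS (p, c, false) s = (p, c, false) := by
            unfold pvStepS; rw [if_neg h1, if_neg h2]
            simp only [if_neg h4]
            simp
          have hbp : pvBodyP s = false := by
            simp only [pvBodyP, Bool.and_eq_false_iff, decide_eq_false_iff_not]
            exact Or.inr h4
          rw [hst, ih, hb]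
          cases ts.findIdx? pvIsB <;> simp [hbp]

lemma pv_main (ls : List String) :
    (let r := ls.foldl (fun st line => pvStepS st (PySem.Str.strip line)) ([], [], false)
     ((r.1, r.2.1) : List String × List String)) =
      (let lines := ls.map PySem.Str.strip
       let b := (lines.findIdx? pvIsB).getD lines.length
       ((lines.take b).filter pvBodyP, (lines.drop (b + 1)).filter pvKeep)) := by
  simp only
  rw [← List.foldl_map (f := PySem.Str.strip) (g := pvStepS)]
  rw [pvStepS_false]
  cases (ls.map PySem.Str.strip).findIdx? pvIsB with
  | none =>
    simp only [Option.getD_none, List.nil_append, List.take_length]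
    rw [List.drop_eq_nil_of_le (by omega)]
    simp
  | some b => simp

-- ===== VERDICT (by name: the statement is the Claim_ definition above) =====
theorem extract_narrative_spec : Claim_equal_extract_narrative := by
  intro report _
  show extract_narrative report = extract_narrative_alt report
  unfold extract_narrative extract_narrative_alt
  exact pv_main (pvLines report)
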